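-- pv_equiv track=rewrite | github.com/Vancouver-KDD/leetcode-study | gb/2024-06-23-MaxSumSubarrayK.py | maxSumSubarrayK
-- ===== SOURCE A (Python) =====
-- def maxSumSubarrayK(nums, k):
--     l = 0
--     maxSum = 0
--     currSum = 0
--     currSet = set()
--     for r, num in enumerate(nums):
--         while num in currSet:
--             currSum -= nums[l]
--             currSet.remove(nums[l])
--             l += 1
--
--         currSum += num
--         currSet.add(num)
--         length = r - l + 1
--
--         if length == k:
--             maxSum = max(maxSum, currSum)
--             currSet.remove(nums[l])
--             currSum -= nums[l]
--             l += 1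
--
--     return [k, maxSum]
-- ===== SOURCE B (Python) =====
-- def maxSumSubarrayK(nums, k):
--     maxSum = 0
--     if 0 <= k <= len(nums):
--         for i in range(len(nums) - k + 1):
--             w = nums[i:i + k]
--             if len(set(w)) == k:
--                 maxSum = max(maxSum, sum(w))
--     return [k, maxSum]
-- ===== Notes on version B (the rewrite author's own statement) =====
-- stated objective: simpler
-- what changed: Replaces the sliding-window pass that maintains a running sum, a distinct-element set and a shrinking left pointer with a direct nested scan: for each window start, slice the k-window, test distinctness via len(set(w))==k and rescan for its sum.
import Mathlib
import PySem

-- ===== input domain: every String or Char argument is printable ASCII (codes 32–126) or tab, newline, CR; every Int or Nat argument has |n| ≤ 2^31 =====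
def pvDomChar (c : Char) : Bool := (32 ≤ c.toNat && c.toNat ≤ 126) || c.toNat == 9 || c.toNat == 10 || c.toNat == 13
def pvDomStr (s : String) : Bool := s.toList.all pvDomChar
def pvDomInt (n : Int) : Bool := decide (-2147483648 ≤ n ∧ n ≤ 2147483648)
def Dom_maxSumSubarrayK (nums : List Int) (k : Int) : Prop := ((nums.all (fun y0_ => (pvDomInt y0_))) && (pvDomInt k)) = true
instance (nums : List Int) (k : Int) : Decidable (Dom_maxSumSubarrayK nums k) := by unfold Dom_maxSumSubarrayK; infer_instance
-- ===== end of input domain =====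

-- B replaces A's sliding-window single pass (running sum + distinct-set + shrinking left pointer) by a
-- direct nested scan over the valid window starts, rescanning each length-k slice for distinctness and sum
-- (simpler; not faster).
-- ===== PORT A =====
-- the inner 'while num in currSet' loop; fuel = |currSet| suffices since each pop removes one present element.
-- set.remove is ported as Set.discard: absence would be Python's KeyError, which is unreachable (the set always
-- holds exactly the window elements).
def pvWhileA (nums : List Int) (num : Int) : Nat → Int → Int → PySem.Set Int → Int × Int × PySem.Set Int
  | 0, l, currSum, currSet => (l, currSum, currSet)
  | fuel+1, l, currSum, currSet =>
    if PySem.Set.contains currSet num then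
      let x := PySem.List.pyGetD nums l 0
      pvWhileA nums num fuel (l + 1) (currSum - x) (PySem.Set.discard currSet x)
    else (l, currSum, currSet)

def maxSumSubarrayK (nums : List Int) (k : Int) : List Int :=
  let st := (PySem.List.enumerate nums 0).foldl
    (fun (st : Int × Int × Int × PySem.Set Int) (p : Int × Int) =>
      let r := p.1
      let num := p.2
      let (l, currSum, currSet) := pvWhileA nums num st.2.2.2.length st.1 st.2.2.1 st.2.2.2
      let maxSum := st.2.1
      let currSum := currSum + num
      let currSet := PySem.Set.add currSet num
      let length := r - l + 1
      if length = k then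
        let maxSum := max maxSum currSum
        let x := PySem.List.pyGetD nums l 0
        (l + 1, maxSum, currSum - x, PySem.Set.discard currSet x)
      else
        (l, maxSum, currSum, currSet))
    (0, 0, 0, PySem.Set.empty)
  [k, st.2.1]

-- ===== PORT B =====
def maxSumSubarrayK_alt (nums : List Int) (k : Int) : List Int :=
  let maxSum : Int := 0
  let maxSum :=
    if 0 ≤ k ∧ k ≤ PySem.List.len nums then
      (PySem.List.pyRange 0 (PySem.List.len nums - k + 1) 1).foldl
        (fun maxSum i =>
          let w := PySem.List.slice nums (some i) (some (i + k))
          if PySem.Set.len (PySem.Set.ofList w) = k then max maxSum w.sum else maxSum)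
        maxSum
    else maxSum
  [k, maxSum]

-- ===== PRECONDITION & SPEC =====
def Spec_maxSumSubarrayK (nums : List Int) (k : Int) (out : List Int) : Prop := out = maxSumSubarrayK_alt nums k
instance (nums : List Int) (k : Int) (out : List Int) : Decidable (Spec_maxSumSubarrayK nums k out) := by unfold Spec_maxSumSubarrayK; infer_instance

-- ===== CLAIM (what is proved, stated in full; the proofs are below) =====
def Claim_equal_maxSumSubarrayK : Prop := ∀ (nums : List Int) (k : Int), Dom_maxSumSubarrayK nums k → Spec_maxSumSubarrayK nums k (maxSumSubarrayK nums k)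

-- ===== LEMMAS AND PROOFS =====

-- B's loop body, named for the proofs (definitionally the lambda in the port of B)
def bstep (nums : List Int) (k : Int) (maxSum : Int) (i : Int) : Int :=
  let w := PySem.List.slice nums (some i) (some (i + k))
  if PySem.Set.len (PySem.Set.ofList w) = k then max maxSum w.sum else maxSum

-- A's loop body, named for the proofs (definitionally the lambda in the port of A)
def astep (nums : List Int) (k : Int) (st : Int × Int × Int × PySem.Set Int) (p : Int × Int) :
    Int × Int × Int × PySem.Set Int :=
  let r := p.1
  let num := p.2
  let (l, currSum, currSet) := pvWhileA nums num st.2.2.2.length st.1 st.2.2.1 st.2.2.2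
  let maxSum := st.2.1
  let currSum := currSum + num
  let currSet := PySem.Set.add currSet num
  let length := r - l + 1
  if length = k then
    let maxSum := max maxSum currSum
    let x := PySem.List.pyGetD nums l 0
    (l + 1, maxSum, currSum - x, PySem.Set.discard currSet x)
  else
    (l, maxSum, currSum, currSet)

lemma A_eq (nums : List Int) (k : Int) :
    maxSumSubarrayK nums k =
      [k, ((PySem.List.enumerate nums 0).foldl (astep nums k) (0, 0, 0, PySem.Set.empty)).2.1] := rfl

lemma alt_eq (nums : List Int) (k : Int) :
    maxSumSubarrayK_alt nums k =
      [k, if 0 ≤ k ∧ k ≤ PySem.List.len nums then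
            (PySem.List.pyRange 0 (PySem.List.len nums - k + 1) 1).foldl (bstep nums k) 0
          else 0] := rfl

-- the window nums[l:n]
def win (nums : List Int) (n l : Nat) : List Int := (nums.take n).drop l

lemma win_eq (nums : List Int) (n l : Nat) : win nums n l = (nums.drop l).take (n - l) :=
  List.drop_take

lemma length_win (nums : List Int) (n l : Nat) : (win nums n l).length = min n nums.length - l := by
  simp [win]

lemma win_eq_nil (nums : List Int) {n l : Nat} (h : n ≤ l) : win nums n l = [] :=
  List.drop_eq_nil_of_le (by simp; omega)

lemma win_cons (nums : List Int) {n l : Nat} (hln : l < n) (hl : l < nums.length) :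
    win nums n l = nums[l] :: win nums n (l + 1) := by
  unfold win
  rw [List.drop_eq_getElem_cons (by simp; omega)]
  congr 1
  exact List.getElem_take

lemma win_succ (nums : List Int) {n l : Nat} (hln : l ≤ n) (hn : n < nums.length) :
    win nums (n + 1) l = win nums n l ++ [nums[n]] := by
  unfold win
  rw [List.take_succ_eq_append_getElem hn, List.drop_append_of_le_length (by simp; omega)]

lemma nodup_win_mono (nums : List Int) {n l l' : Nat} (h : l ≤ l')
    (hnd : (win nums n l).Nodup) : (win nums n l').Nodup := by
  have : win nums n l' = (win nums n l).drop (l' - l) := by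
    unfold win; rw [List.drop_drop]; congr 1; omega
  rw [this]
  exact hnd.sublist (List.drop_sublist _ _)

lemma getElem_dt (nums : List Int) (i m j : Nat) (hj : j < m) (hlen : i + j < nums.length) :
    ((nums.drop i).take m)[j]'(by simp; omega) = nums[i + j] := by
  simp [List.getElem_take, List.getElem_drop]

lemma mem_win_iff {nums : List Int} {n l : Nat} (hn : n ≤ nums.length) {y : Int} :
    y ∈ win nums n l ↔ ∃ j, l ≤ j ∧ j < n ∧ ∃ hj : j < nums.length, nums[j] = y := by
  rw [win_eq]
  constructor
  · intro h
    obtain ⟨j, hjl, he⟩ := List.mem_iff_getElem.mp h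
    have hjl' : j < n - l := by simpa using lt_of_lt_of_le hjl (by simp)
    have hlen : l + j < nums.length := by omega
    refine ⟨l + j, by omega, by omega, hlen, ?_⟩
    rw [← getElem_dt nums l (n - l) j hjl' hlen]
    exact he
  · rintro ⟨j, h1, h2, hj, he⟩
    rw [List.mem_iff_getElem]
    refine ⟨j - l, by simp; omega, ?_⟩
    rw [getElem_dt nums l (n - l) (j - l) (by omega) (by omega)]
    simp only [show l + (j - l) = j from by omega]
    exact he

lemma not_nodup_dt (nums : List Int) (i m j1 j2 : Nat) (hne : j1 ≠ j2) (h1 : j1 < m) (h2 : j2 < m)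
    (hl1 : i + j1 < nums.length) (hl2 : i + j2 < nums.length)
    (he : nums[i + j1] = nums[i + j2]) : ¬ ((nums.drop i).take m).Nodup := by
  intro hnd
  apply hne
  apply (hnd.getElem_inj_iff (hi := by simp; omega) (hj := by simp; omega)).mp
  rw [getElem_dt nums i m j1 h1 hl1, getElem_dt nums i m j2 h2 hl2]
  exact he

lemma discard_length {s : List Int} {x : Int} (hnd : s.Nodup) (hx : x ∈ s) :
    (PySem.Set.discard s x).length + 1 = s.length := by
  have h := List.length_eq_length_filter_add (l := s) (fun y => y == x)
  have hc : (s.filter (fun y => y == x)).length = 1 := by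
    rw [← List.countP_eq_length_filter]
    simpa [List.count] using List.count_eq_one_of_mem hnd hx
  unfold PySem.Set.discard
  omega

lemma ofList_length_eq_imp_nodup : ∀ xs : List Int,
    (PySem.Set.ofList xs).length = xs.length → xs.Nodup := by
  intro xs
  induction xs with
  | nil => simp
  | cons x xs ih =>
    intro h
    rw [PySem.Set.ofList_cons] at h
    simp only [List.length_cons, Nat.add_right_cancel_iff] at h
    have h1 : (PySem.Set.discard (PySem.Set.ofList xs) x).length ≤ (PySem.Set.ofList xs).length :=
      List.length_filter_le _ _
    have h2 : (PySem.Set.ofList xs).length ≤ xs.length := PySem.Set.length_ofList_le xs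
    have hx : x ∉ PySem.Set.ofList xs := by
      intro hx
      have : (PySem.Set.discard (PySem.Set.ofList xs) x).length < (PySem.Set.ofList xs).length :=
        List.length_filter_lt_length_iff_exists.mpr ⟨x, hx, by simp⟩
      omega
    exact List.nodup_cons.mpr ⟨by simpa [PySem.Set.mem_ofList] using hx, ih (by omega)⟩

lemma bstep_zero (nums : List Int) {k : Int} (hk : k ≤ 0) :
    ∀ L : List Int, L.foldl (bstep nums k) 0 = 0 := by
  intro L
  induction L with
  | nil => rfl
  | cons i L ih =>
    rw [List.foldl_cons]
    have : bstep nums k 0 i = 0 := by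
      unfold bstep
      by_cases hc : PySem.Set.len (PySem.Set.ofList (PySem.List.slice nums (some i) (some (i + k)))) = k
      · have hk0 : k = 0 := by
          have : (0:Int) ≤ PySem.Set.len (PySem.Set.ofList (PySem.List.slice nums (some i) (some (i + k)))) := by
            unfold PySem.Set.len; positivity
          omega
        have hw : PySem.List.slice nums (some i) (some (i + k)) = [] := by
          rcases hweq : PySem.List.slice nums (some i) (some (i + k)) with _ | ⟨y, ys⟩
          · rfl
          · exfalso
            rw [hweq, PySem.Set.ofList_cons] at hc
            unfold PySem.Set.len at hc
            simp at hc
            omega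
        rw [if_pos hc, hw]
        simp
      · rw [if_neg hc]
    rw [this, ih]

-- the loop invariant of A's for-loop, after processing the first n elements
def AInv (nums : List Int) (k : Int) (n : Nat) (st : Int × Int × Int × PySem.Set Int) : Prop :=
  ∃ l : Nat, st.1 = (l : Int) ∧ l ≤ n ∧
    (win nums n l).Nodup ∧
    st.2.2.1 = (win nums n l).sum ∧
    (∀ x, x ∈ st.2.2.2 ↔ x ∈ win nums n l) ∧
    st.2.2.2.Nodup ∧
    (1 ≤ k → (n : Int) + 1 - k ≤ (l : Int)) ∧
    (l = 0 ∨ (l : Int) = (n : Int) + 1 - k ∨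
      (∃ h : l - 1 < nums.length, 0 < l ∧ nums[l - 1] ∈ win nums n l)) ∧
    st.2.1 = (PySem.List.pyRange 0 ((n : Int) - k + 1) 1).foldl (bstep nums k) 0

-- the while loop: it advances l just past the (unique) occurrence of num in the window, if any
lemma whileA_spec (nums : List Int) (num : Int) :
    ∀ (f l n : Nat) (currSet : PySem.Set Int),
      f = currSet.length → l ≤ n → n ≤ nums.length →
      (win nums n l).Nodup → (∀ x, x ∈ currSet ↔ x ∈ win nums n l) → currSet.Nodup →
      ∃ (l' : Nat) (s' : PySem.Set Int),
        pvWhileA nums num f (l : Int) ((win nums n l).sum) currSet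
          = ((l' : Int), (win nums n l').sum, s') ∧
        l ≤ l' ∧ l' ≤ n ∧
        (∀ x, x ∈ s' ↔ x ∈ win nums n l') ∧ s'.Nodup ∧
        num ∉ win nums n l' ∧
        (l' = l ∨ (∃ h : l' - 1 < nums.length, 0 < l' ∧ nums[l' - 1] = num)) := by
  intro f
  induction f with
  | zero =>
    intro l n s hf hln hn hnd hmem hsnd
    have hs : s = [] := List.length_eq_zero_iff.mp hf.symm
    refine ⟨l, s, rfl, le_refl l, hln, hmem, hsnd, ?_, Or.inl rfl⟩
    intro h
    have := (hmem num).mpr h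
    simp [hs] at this
  | succ f ih =>
    intro l n s hf hln hn hnd hmem hsnd
    by_cases hc : PySem.Set.contains s num = true
    · -- num in currSet: pop nums[l]
      have hnumw : num ∈ win nums n l := (hmem num).mp ((PySem.Set.contains_iff s num).mp hc)
      have hlnn : l < n := by
        by_contra h
        rw [win_eq_nil nums (by omega)] at hnumw
        simp at hnumw
      have hllen : l < nums.length := lt_of_lt_of_le hlnn hn
      have hwc : win nums n l = nums[l] :: win nums n (l + 1) := win_cons nums hlnn hllen
      have hxs : nums[l] ∈ s := (hmem _).mpr (hwc ▸ List.mem_cons_self)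
      have hlen2 : f = (PySem.Set.discard s nums[l]).length := by
        have := discard_length hsnd hxs; omega
      have hndc := List.nodup_cons.mp (hwc ▸ hnd)
      have hmem2 : ∀ x, x ∈ PySem.Set.discard s nums[l] ↔ x ∈ win nums n (l + 1) := by
        intro x
        rw [PySem.Set.mem_discard, hmem x, hwc, List.mem_cons]
        constructor
        · rintro ⟨h1 | h1, h2⟩
          · exact absurd h1 h2
          · exact h1
        · intro h1
          exact ⟨Or.inr h1, fun he => hndc.1 (he ▸ h1)⟩
      obtain ⟨l', s', heq, h1, h2, h3, h4, h5, h6⟩ :=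
        ih (l + 1) n _ hlen2 (by omega) hn hndc.2 hmem2 (PySem.Set.nodup_discard s nums[l] hsnd)
      refine ⟨l', s', ?_, by omega, h2, h3, h4, h5, ?_⟩
      · show pvWhileA nums num (f + 1) (l : Int) ((win nums n l).sum) s = _
        rw [pvWhileA]
        simp only [hc, if_true]
        have hxd : PySem.List.pyGetD nums (l : Int) 0 = nums[l] := by
          rw [PySem.List.pyGetD_natCast]
          exact List.getD_eq_getElem nums 0 hllen
        rw [hxd]
        have hsum : (win nums n l).sum - nums[l] = (win nums n (l + 1)).sum := by
          rw [hwc]; simp [List.sum_cons]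
        rw [hsum]
        have hcast : (l : Int) + 1 = ((l + 1 : Nat) : Int) := by push_cast; ring
        rw [hcast]
        exact heq
      · rcases h6 with he | he
        · subst he
          right
          refine ⟨by omega, by omega, ?_⟩
          have hnum2 : num ∉ win nums n (l + 1) := by
            intro h; exact h5 h
          rcases List.mem_cons.mp (hwc ▸ hnumw) with h | h
          · simpa using h.symm
          · exact absurd h hnum2
        · exact Or.inr he
    · -- num not in currSet: loop exits immediately
      refine ⟨l, s, ?_, le_refl l, hln, hmem, hsnd, ?_, Or.inl rfl⟩
      · rw [pvWhileA, if_neg hc]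
      · intro h
        exact hc ((PySem.Set.contains_iff s num).mpr ((hmem num).mpr h))

-- one iteration of A's for-loop preserves the invariant
lemma astep_inv (nums : List Int) (k : Int) (n : Nat) (hn : n < nums.length)
    (st : Int × Int × Int × PySem.Set Int) (hInv : AInv nums k n st) :
    AInv nums k (n + 1) (astep nums k st ((n : Int), nums[n])) := by
  obtain ⟨li, ms, cs, set⟩ := st
  obtain ⟨l, hst1, hln, hnd, hsum, hmem, hsnd, hbound, hdisj, hmax⟩ := hInv
  simp only at hst1 hsum hmem hsnd hbound hdisj hmax
  subst hst1 hsum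
  obtain ⟨l', s', heq, hll', hl'n, hmem', hsnd', hnum', hlast⟩ :=
    whileA_spec nums nums[n] set.length l n set rfl hln (by omega) hnd hmem hsnd
  have hli' : (l : Int) ≤ (l' : Int) := by exact_mod_cast hll'
  have hl'len : l' < nums.length := by omega
  have hw2 : win nums (n + 1) l' = win nums n l' ++ [nums[n]] := win_succ nums hl'n hn
  have hnd2 : (win nums (n + 1) l').Nodup := by
    rw [hw2]
    refine List.Nodup.append (nodup_win_mono nums hll' hnd) (List.nodup_singleton _) ?_
    intro a ha hb
    simp at hb
    exact hnum' (hb ▸ ha)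
  have hsum2 : (win nums n l').sum + nums[n] = (win nums (n + 1) l').sum := by
    rw [hw2]; simp
  have hastep : astep nums k ((l : Int), ms, (win nums n l).sum, set) ((n : Int), nums[n]) =
      (if (n : Int) - (l' : Int) + 1 = k then
        ((l' : Int) + 1, max ms ((win nums n l').sum + nums[n]),
          ((win nums n l').sum + nums[n]) - PySem.List.pyGetD nums (l' : Int) 0,
          PySem.Set.discard (PySem.Set.add s' nums[n]) (PySem.List.pyGetD nums (l' : Int) 0))
      else ((l' : Int), ms, (win nums n l').sum + nums[n], PySem.Set.add s' nums[n])) := by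
    unfold astep
    dsimp only
    rw [heq]
  rw [hastep]
  by_cases hfire : (n : Int) - (l' : Int) + 1 = k
  · -- window length hit k: record and slide
    rw [if_pos hfire]
    have hk1 : (1 : Int) ≤ k := by omega
    have hl'n1 : l' < n + 1 := by omega
    have hwc2 : win nums (n + 1) l' = nums[l'] :: win nums (n + 1) (l' + 1) :=
      win_cons nums hl'n1 hl'len
    have hndc2 := List.nodup_cons.mp (hwc2 ▸ hnd2)
    have hxd : PySem.List.pyGetD nums (l' : Int) 0 = nums[l'] := by
      rw [PySem.List.pyGetD_natCast]
      exact List.getD_eq_getElem nums 0 hl'len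
    rw [hxd]
    refine ⟨l' + 1, ?_, by omega, hndc2.2, ?_, ?_, ?_, ?_, ?_, ?_⟩
    · show (l' : Int) + 1 = ((l' + 1 : Nat) : Int)
      push_cast; ring
    · show (win nums n l').sum + nums[n] - nums[l'] = (win nums (n + 1) (l' + 1)).sum
      rw [hsum2, hwc2]
      simp [List.sum_cons]
    · intro x
      show x ∈ PySem.Set.discard (PySem.Set.add s' nums[n]) nums[l'] ↔ _
      rw [PySem.Set.mem_discard, PySem.Set.mem_add, hmem' x]
      have hx9 : x ∈ win nums n l' ∨ x = nums[n] ↔ x ∈ win nums (n + 1) l' := by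
        rw [hw2]; simp
      rw [hx9, hwc2, List.mem_cons]
      constructor
      · rintro ⟨h1 | h1, h2⟩
        · exact absurd h1 h2
        · exact h1
      · intro h1
        exact ⟨Or.inr h1, fun he => hndc2.1 (he ▸ h1)⟩
    · exact PySem.Set.nodup_discard _ _ (PySem.Set.nodup_add _ _ hsnd')
    · intro _
      show ((n + 1 : Nat) : Int) + 1 - k ≤ ((l' + 1 : Nat) : Int)
      push_cast; omega
    · right; left
      show ((l' + 1 : Nat) : Int) = ((n + 1 : Nat) : Int) + 1 - k
      push_cast; omega
    · -- maxSum: the new window nums[l':n+1] is distinct of length k, B records it too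
      show max ms ((win nums n l').sum + nums[n])
          = (PySem.List.pyRange 0 (((n + 1 : Nat) : Int) - k + 1) 1).foldl (bstep nums k) 0
      have e1 : PySem.List.pyRange 0 (((n + 1 : Nat) : Int) - k + 1) 1
          = PySem.List.pyRange 0 ((n : Int) - k + 1) 1 ++ [(l' : Int)] := by
        have h7 : ((n + 1 : Nat) : Int) - k + 1 = ((n : Int) - k + 1) + 1 := by push_cast; ring
        rw [h7, PySem.List.pyRange_one_succ_right (by omega)]
        congr 1
        simp only [List.cons.injEq, and_true]
        omega
      rw [e1, List.foldl_append]
      simp only [List.foldl_cons, List.foldl_nil]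
      rw [← hmax]
      have hslice : PySem.List.slice nums (some (l' : Int)) (some ((l' : Int) + k)) =
          win nums (n + 1) l' := by
        have h9 : (l' : Int) + k = ((n + 1 : Nat) : Int) := by push_cast; omega
        rw [h9, PySem.List.slice_natCast, win_eq]
      have hlen : (win nums (n + 1) l').length = n + 1 - l' := by
        rw [length_win]; omega
      have hofl : PySem.Set.ofList (win nums (n + 1) l') = win nums (n + 1) l' :=
        PySem.Set.ofList_eq_self_of_nodup _ hnd2
      have hcond : PySem.Set.len (PySem.Set.ofList (win nums (n + 1) l')) = k := by
        rw [hofl]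
        unfold PySem.Set.len
        rw [hlen]; omega
      have e2 : bstep nums k ms (l' : Int) = max ms ((win nums (n + 1) l').sum) := by
        unfold bstep
        rw [hslice, if_pos hcond]
      rw [e2, hsum2]
  · -- no fire: window stays shorter than k (or k is out of reach); just extend
    rw [if_neg hfire]
    refine ⟨l', rfl, by omega, hnd2, hsum2, ?_, PySem.Set.nodup_add _ _ hsnd', ?_, ?_, ?_⟩
    · intro x
      show x ∈ PySem.Set.add s' nums[n] ↔ _
      rw [PySem.Set.mem_add, hmem' x, hw2]
      simp
    · intro hk
      have hb := hbound hk
      show ((n + 1 : Nat) : Int) + 1 - k ≤ (l' : Int)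
      push_cast
      omega
    · rcases hlast with he | ⟨hh, hpos, heqn⟩
      · subst he
        rcases hdisj with h0 | hnk | ⟨hh, hpos, hmemw⟩
        · exact Or.inl h0
        · exfalso; apply hfire; omega
        · right; right
          refine ⟨by omega, by omega, ?_⟩
          rw [hw2]
          exact List.mem_append_left _ hmemw
      · right; right
        refine ⟨by omega, by omega, ?_⟩
        rw [hw2]
        exact List.mem_append_right _ (by simp [heqn])
    · -- maxSum unchanged: the length-k window ending here (if any) has a repeat
      show ms = (PySem.List.pyRange 0 (((n + 1 : Nat) : Int) - k + 1) 1).foldl (bstep nums k) 0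
      by_cases hk : 1 ≤ k
      · by_cases hi : (0 : Int) ≤ (n : Int) + 1 - k
        · set i : Int := (n : Int) - k + 1 with hidef
          have e1 : PySem.List.pyRange 0 (((n + 1 : Nat) : Int) - k + 1) 1
              = PySem.List.pyRange 0 ((n : Int) - k + 1) 1 ++ [i] := by
            have h7 : ((n + 1 : Nat) : Int) - k + 1 = ((n : Int) - k + 1) + 1 := by push_cast; ring
            rw [h7, PySem.List.pyRange_one_succ_right (by omega)]
          rw [e1, List.foldl_append]
          simp only [List.foldl_cons, List.foldl_nil]
          rw [← hmax]
          have hb := hbound hk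
          set iN : Nat := i.toNat with hiNdef
          have hicast : (iN : Int) = i := Int.toNat_of_nonneg (by omega)
          have hl'i : (iN : Int) < (l' : Int) := by rw [hicast]; omega
          have hl'iN : iN < l' := by exact_mod_cast hl'i
          have hslice : PySem.List.slice nums (some i) (some (i + k)) =
              (nums.drop iN).take (n + 1 - iN) := by
            have h8 : i + k = ((n + 1 : Nat) : Int) := by push_cast; omega
            rw [h8, ← hicast, PySem.List.slice_natCast]
          -- produce a duplicate inside the window nums[i : n+1]
          have hdup : ∃ (p q : Nat) (hp : p < nums.length) (hq : q < nums.length),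
              iN ≤ p ∧ p < q ∧ q ≤ n ∧ nums[p] = nums[q] := by
            rcases hlast with he | ⟨hh, hpos, heqn⟩
            · subst he
              rcases hdisj with h0 | hnk | ⟨hh, hpos, hmemw⟩
              · exact absurd h0 (by omega)
              · exfalso; apply hfire; omega
              · obtain ⟨j, hj1, hj2, hjlen, hje⟩ := (mem_win_iff (by omega)).mp hmemw
                exact ⟨l' - 1, j, by omega, by omega, by omega, by omega, by omega, hje.symm⟩
            · exact ⟨l' - 1, n, by omega, by omega, by omega, by omega, le_refl n, heqn⟩
          obtain ⟨p, q, hplen, hqlen, hp1, hpq, hqn, hpe⟩ := hdup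
          have hnotnodup : ¬ ((nums.drop iN).take (n + 1 - iN)).Nodup := by
            apply not_nodup_dt nums iN (n + 1 - iN) (p - iN) (q - iN) (by omega) (by omega)
              (by omega) (by omega) (by omega)
            simp only [show iN + (p - iN) = p from by omega, show iN + (q - iN) = q from by omega]
            exact hpe
          have hcond : ¬ (PySem.Set.len (PySem.Set.ofList
              (PySem.List.slice nums (some i) (some (i + k)))) = k) := by
            intro hc
            apply hnotnodup
            rw [hslice] at hc
            apply ofList_length_eq_imp_nodup
            have hwl : ((nums.drop iN).take (n + 1 - iN)).length = n + 1 - iN := by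
              simp; omega
            unfold PySem.Set.len at hc
            rw [hwl]
            omega
          unfold bstep
          rw [if_neg hcond]
        · rw [hmax, PySem.List.pyRange_one_eq_nil (a := 0) (b := ((n + 1 : Nat) : Int) - k + 1)
              (by push_cast; omega),
            PySem.List.pyRange_one_eq_nil (a := 0) (b := (n : Int) - k + 1) (by omega)]
      · rw [hmax, bstep_zero nums (by omega), bstep_zero nums (by omega)]

-- A's for-loop, run to the end, preserves the invariant
lemma foldA_inv (nums : List Int) (k : Int) :
    ∀ (suf : List Int) (n : Nat) (st : Int × Int × Int × PySem.Set Int),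
      nums.drop n = suf → n ≤ nums.length → AInv nums k n st →
      AInv nums k nums.length ((PySem.List.enumerate suf (n : Int)).foldl (astep nums k) st) := by
  intro suf
  induction suf with
  | nil =>
    intro n st hdrop hnle hinv
    have hlen : nums.length - n = 0 := by
      have := congrArg List.length hdrop; simpa using this
    have hne : n = nums.length := by omega
    subst hne
    simpa [PySem.List.enumerate] using hinv
  | cons x suf ih =>
    intro n st hdrop hnle hinv
    have hlt : n < nums.length := by
      by_contra h
      rw [List.drop_eq_nil_of_le (by omega)] at hdrop
      simp at hdrop
    have hx : nums[n] = x := by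
      have h0 : (nums.drop n)[0]'(by rw [hdrop]; simp) = x := by
        simp [hdrop]
      rw [List.getElem_drop] at h0
      simpa using h0
    have hdrop' : nums.drop (n + 1) = suf := by
      have := congrArg List.tail hdrop
      simpa [List.tail_drop] using this
    rw [PySem.List.enumerate_cons, List.foldl_cons]
    have hstep := astep_inv nums k n hlt st hinv
    rw [hx] at hstep
    have hcast : (n : Int) + 1 = ((n + 1 : Nat) : Int) := by push_cast; ring
    rw [hcast]
    exact ih (n + 1) _ hdrop' (by omega) hstep

-- the invariant holds before the loop
lemma AInv_zero (nums : List Int) (k : Int) : AInv nums k 0 (0, 0, 0, PySem.Set.empty) := by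
  refine ⟨0, rfl, le_refl 0, ?_, ?_, ?_, ?_, ?_, Or.inl rfl, ?_⟩
  · simp [win]
  · simp [win]
  · intro x; simp [win, PySem.Set.empty]
  · simp [PySem.Set.empty]
  · intro hk; simp; omega
  · by_cases hk : 1 ≤ k
    · rw [PySem.List.pyRange_one_eq_nil (a := 0) (by omega)]; rfl
    · exact (bstep_zero nums (by omega) _).symm


-- ===== VERDICT (by name: the statement is the Claim_ definition above) =====
theorem maxSumSubarrayK_spec : Claim_equal_maxSumSubarrayK := by
  unfold Claim_equal_maxSumSubarrayK
  intro nums k _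
  unfold Spec_maxSumSubarrayK
  rw [A_eq, alt_eq]
  have h := foldA_inv nums k nums 0 (0, 0, 0, PySem.Set.empty) rfl (by omega) (AInv_zero nums k)
  rw [Nat.cast_zero] at h
  obtain ⟨l, _, _, _, _, _, _, _, _, hmax⟩ := h
  rw [hmax]
  simp only [PySem.List.len_eq]
  by_cases hc : 0 ≤ k ∧ k ≤ (nums.length : Int)
  · rw [if_pos hc]
  · rw [if_neg hc]
    rcases lt_or_ge k 0 with hk | hk
    · rw [bstep_zero nums (by omega)]
    · rw [PySem.List.pyRange_one_eq_nil (a := 0) (by omega)]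
      rfl
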